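-- pv_equiv track=rewrite | github.com/guige2023/rabai_autoclick | actions/data_imputer_action.py | _forward_fill
-- ===== SOURCE A (Python) =====
-- from typing import Any, Callable, Optional, Sequence
--
-- def _forward_fill(
--
--     values: list[Any],
--     limit: Optional[int] = None,
-- ) -> list[Any]:
--     """Forward fill missing values."""
--     result = []
--     last_valid = None
--     fill_count = 0
--
--     for value in values:
--         if value is not None:
--             last_valid = value
--             fill_count = 0
--             result.append(value)
--         elif last_valid is not None:
--             if limit is None or fill_count < limit:
--                 result.append(last_valid)
--                 fill_count += 1
--             else:
--                 result.append(None)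
--         else:
--             result.append(None)
--
--     return result
-- ===== SOURCE B (Python) =====
-- from typing import Any, Optional
--
--
-- def _forward_fill(
--     values: list[Any],
--     limit: Optional[int] = None,
-- ) -> list[Any]:
--     """Forward fill missing values (two-pass: carry table, then mapping)."""
--     # pass 1: for each position, the most recent non-None value and its distance
--     carried = []
--     last = None
--     dist = 0
--     for v in values:
--         if v is not None:
--             last = v
--             dist = 0
--         else:
--             dist += 1
--         carried.append((last, dist))
--     # pass 2: map each position using the table
--     return [
--         v if v is not None
--         else (last if last is not None and (limit is None or dist <= limit) else None)
--         for v, (last, dist) in zip(values, carried)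
--     ]
-- ===== Notes on version B (the rewrite author's own statement) =====
-- stated objective: alternative
-- what changed: Replaced the single interleaved loop (mutable last_valid/fill_count with in-loop branching and counter resets) by two separate passes: pass 1 builds a carry table of (most recent non-None value, distance to it) per position, pass 2 maps each position through the table with a distance <= limit test.
import Mathlib
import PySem

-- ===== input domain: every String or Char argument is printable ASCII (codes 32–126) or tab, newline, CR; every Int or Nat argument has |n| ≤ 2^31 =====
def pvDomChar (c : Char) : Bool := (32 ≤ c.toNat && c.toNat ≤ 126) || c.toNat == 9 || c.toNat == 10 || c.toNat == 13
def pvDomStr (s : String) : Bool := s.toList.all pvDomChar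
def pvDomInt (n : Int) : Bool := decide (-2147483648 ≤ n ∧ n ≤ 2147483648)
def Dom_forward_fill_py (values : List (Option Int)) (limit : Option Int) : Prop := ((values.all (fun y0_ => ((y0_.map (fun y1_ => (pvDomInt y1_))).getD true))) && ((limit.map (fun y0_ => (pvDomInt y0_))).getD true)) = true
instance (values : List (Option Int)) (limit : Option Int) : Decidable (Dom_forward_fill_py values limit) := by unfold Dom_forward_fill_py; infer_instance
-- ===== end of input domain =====

-- B replaces A's single interleaved fill loop by two passes (a carry table, then a mapping pass); same cost, different decomposition.


-- ===== PORT A =====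
-- A's single for-loop: state (last_valid, fill_count), branch order as in the Python.
def ffLoopA (limit : Option Int) : List (Option Int) → Option Int → Int → List (Option Int)
  | [], _, _ => []
  | v :: vs, last_valid, fill_count =>
    match v with
    | some x => some x :: ffLoopA limit vs (some x) 0
    | none =>
      match last_valid with
      | some lv =>
        if limit.isNone || fill_count < limit.getD 0 then
          some lv :: ffLoopA limit vs last_valid (fill_count + 1)
        else
          none :: ffLoopA limit vs last_valid fill_count
      | none => none :: ffLoopA limit vs last_valid fill_count

def forward_fill_py (values : List (Option Int)) (limit : Option Int) : List (Option Int) :=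
  ffLoopA limit values none 0

-- ===== PORT B =====
-- pass 1 of Source B: carry table of (most recent non-None value, distance to it)
def ffCarry : List (Option Int) → Option Int → Int → List (Option Int × Int)
  | [], _, _ => []
  | v :: vs, last, dist =>
    match v with
    | some x => (some x, 0) :: ffCarry vs (some x) 0
    | none => (last, dist + 1) :: ffCarry vs last (dist + 1)

def forward_fill_py_alt (values : List (Option Int)) (limit : Option Int) : List (Option Int) :=
  let carried := ffCarry values none 0
  (values.zip carried).map (fun p =>
    match p.1 with
    | some x => some x
    | none =>
      match p.2.1 with
      | some lv =>
        if (match limit with | none => true | some l => p.2.2 ≤ l) then some lv else none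
      | none => none)

-- ===== PRECONDITION & SPEC =====
def Spec_forward_fill_py (values : List (Option Int)) (limit : Option Int) (out : List (Option Int)) : Prop := out = forward_fill_py_alt values limit
instance (values : List (Option Int)) (limit : Option Int) (out : List (Option Int)) : Decidable (Spec_forward_fill_py values limit out) := by unfold Spec_forward_fill_py; infer_instance

-- ===== CLAIM (what is proved, stated in full; the proofs are below) =====
def Claim_equal_forward_fill_py : Prop := ∀ (values : List (Option Int)) (limit : Option Int), Dom_forward_fill_py values limit → Spec_forward_fill_py values limit (forward_fill_py values limit)

-- ===== LEMMAS AND PROOFS =====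

-- Invariant linking A's fill counter with B's distance: while filling they are equal;
-- once the limit is exhausted both are at/above it.
def ffInv (limit : Option Int) (last : Option Int) (cnt dist : Int) : Prop :=
  match limit, last with
  | some l, some _ => cnt = dist ∨ (l ≤ cnt ∧ l ≤ dist)
  | _, _ => True

lemma ffLoopA_eq_alt (vs : List (Option Int)) (limit last : Option Int) (cnt dist : Int)
    (h : ffInv limit last cnt dist) :
    ffLoopA limit vs last cnt =
      (vs.zip (ffCarry vs last dist)).map (fun p =>
        match p.1 with
        | some x => some x
        | none =>
          match p.2.1 with
          | some lv =>
            if (match limit with | none => true | some l => p.2.2 ≤ l) then some lv else none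
          | none => none) := by
  induction vs generalizing last cnt dist with
  | nil => simp [ffLoopA, ffCarry]
  | cons v vs ih =>
    cases v with
    | some x =>
      simp only [ffLoopA, ffCarry, List.zip_cons_cons, List.map_cons]
      refine congrArg _ (ih (some x) 0 0 ?_)
      cases limit <;> simp [ffInv]
    | none =>
      cases last with
      | none =>
        simp only [ffLoopA, ffCarry, List.zip_cons_cons, List.map_cons]
        refine congrArg _ (ih none cnt (dist + 1) ?_)
        cases limit <;> simp [ffInv]
      | some lv =>
        cases limit with
        | none =>
          simp only [ffLoopA, ffCarry, List.zip_cons_cons, List.map_cons,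
            Option.isNone_none, Bool.true_or, if_true]
          exact congrArg _ (ih (some lv) (cnt + 1) (dist + 1) trivial)
        | some l =>
          simp only [ffInv] at h
          simp only [ffLoopA, ffCarry, List.zip_cons_cons, List.map_cons]
          by_cases hc : cnt < l
          · rw [if_pos (by simp [hc])]
            have hd : dist + 1 ≤ l := by omega
            refine congrArg₂ List.cons (by simp [hd]) ?_
            exact ih (some lv) (cnt + 1) (dist + 1) (by simp only [ffInv]; omega)
          · rw [if_neg (by simp [hc])]
            have hd : ¬ (dist + 1 ≤ l) := by omega
            refine congrArg₂ List.cons (by simp [hd]) ?_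
            exact ih (some lv) cnt (dist + 1) (by simp only [ffInv]; omega)

-- ===== VERDICT (by name: the statement is the Claim_ definition above) =====
theorem forward_fill_py_spec : Claim_equal_forward_fill_py := by
  intro values limit _
  unfold Spec_forward_fill_py forward_fill_py forward_fill_py_alt
  exact ffLoopA_eq_alt values limit none 0 0 (by cases limit <;> simp [ffInv])
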